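-- pv_equiv track=rewrite | github.com/sea-virtue/rubric_for_agents | src/rubric_miner/compressor.py | _balanced_cues
-- ===== SOURCE A (Python) =====
-- from typing import Any, Dict, Iterable, List, Mapping, Sequence
--
-- def _balanced_cues(cues: Iterable[Any], limit: int) -> List[str]:
--     clean_cues = _dedupe_preserve_order(map(str, cues or []))
--     if len(clean_cues) <= limit:
--         return clean_cues
--
--     groups: Dict[str, List[str]] = {}
--     order: List[str] = []
--     for cue in clean_cues:
--         group = cue.split(":", 1)[0] if ":" in cue else "other"
--         if group not in groups:
--             groups[group] = []
--             order.append(group)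
--         groups[group].append(cue)
--
--     per_group = max(1, limit // max(1, len(order)))
--     selected: List[str] = []
--     for group in order:
--         selected.extend(groups[group][:per_group])
--         if len(selected) >= limit:
--             return selected[:limit]
--
--     if len(selected) < limit:
--         for group in order:
--             selected.extend(groups[group][per_group:])
--             if len(selected) >= limit:
--                 return _dedupe_preserve_order(selected)[:limit]
--     return _dedupe_preserve_order(selected)[:limit]
--
-- def _dedupe_preserve_order(values: Iterable[str]) -> List[str]:
--     seen = set()
--     output = []
--     for value in values:
--         clean = str(value).strip()
--         if not clean:
--             continue
--         key = clean.lower()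
--         if key in seen:
--             continue
--         output.append(clean)
--         seen.add(key)
--     return output
-- ===== SOURCE B (Python) =====
-- from typing import Any, Iterable, List
--
--
-- def _dedupe_preserve_order(values: Iterable[str]) -> List[str]:
--     seen = set()
--     output = []
--     for value in values:
--         clean = str(value).strip()
--         if not clean:
--             continue
--         key = clean.lower()
--         if key in seen:
--             continue
--         output.append(clean)
--         seen.add(key)
--     return output
--
--
-- def _balanced_cues(cues: Iterable[Any], limit: int) -> List[str]:
--     clean = _dedupe_preserve_order(map(str, cues or []))
--     if len(clean) <= limit:
--         return clean
--     # Decorate each cue with (group index in first-seen order, rank within its group),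
--     # then one stable sort by a computed block key replaces grouping and concatenation:
--     # head blocks (rank < per_group) in group order, then tail blocks in group order.
--     gidx = {}
--     keyed = []
--     for cue in clean:
--         g = cue.split(":", 1)[0] if ":" in cue else "other"
--         i, r = gidx.get(g, (len(gidx), 0))
--         gidx[g] = (i, r + 1)
--         keyed.append((i, r, cue))
--     n = len(gidx)
--     per = max(1, limit // max(1, n))
--     ranked = sorted(keyed, key=lambda t: (t[0] if t[1] < per else n + t[0], t[1]))
--     return [c for _, _, c in ranked[:limit]]
-- ===== Notes on version B (the rewrite author's own statement) =====
-- stated objective: alternative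
-- what changed: Replaces A's group-lists dict and two early-exit concatenation loops by a decorate-sort-truncate scheme: each cue is tagged with (group index, rank within group) in one pass, then a single stable sort by a computed block key (group index for ranks below the quota, num_groups + group index for the rest) produces the balanced order, truncated once to limit.
-- outside the precondition, e.g. on _balanced_cues(['a', 'b'], -1): A returns [], B returns ['a']
import Mathlib
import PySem

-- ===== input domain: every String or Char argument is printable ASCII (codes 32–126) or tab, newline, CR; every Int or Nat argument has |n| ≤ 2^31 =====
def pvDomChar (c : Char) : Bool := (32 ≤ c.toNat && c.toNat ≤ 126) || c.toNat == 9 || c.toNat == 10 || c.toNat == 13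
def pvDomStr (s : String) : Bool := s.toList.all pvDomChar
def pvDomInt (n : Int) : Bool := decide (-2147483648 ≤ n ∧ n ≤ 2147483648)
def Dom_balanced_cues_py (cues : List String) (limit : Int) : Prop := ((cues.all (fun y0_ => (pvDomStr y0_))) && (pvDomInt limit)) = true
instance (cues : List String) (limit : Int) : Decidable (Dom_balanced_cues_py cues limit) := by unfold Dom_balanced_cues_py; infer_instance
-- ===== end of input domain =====

-- B replaces A's group-lists dict and its two early-exit selection loops by a
-- decorate-sort-truncate scheme (tag each cue with (group index, rank), one stable
-- sort by a computed block key, one truncation); objective: alternative.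

-- ===== PORT A =====
-- module helper _dedupe_preserve_order (shared verbatim by both Python versions)
def pvDedupe (values : List String) : List String :=
  (values.foldl (fun (st : PySem.Set String × List String) value =>
      let clean := PySem.Str.strip value
      if clean = "" then st
      else
        let key := PySem.Str.lower clean
        if PySem.Set.contains st.1 key then st
        else (PySem.Set.add st.1 key, st.2 ++ [clean]))
    (PySem.Set.empty, [])).2

-- cue.split(":", 1)[0] if ":" in cue else "other"; split with the nonempty separator ":"
-- never returns none and its result is never empty, so [0] is exactly its head
def pvGroupOf (cue : String) : String :=
  if PySem.Str.isIn ":" cue then ((PySem.Str.splitMax? cue ":" 1).getD []).headD ""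
  else "other"

-- A's grouping loop: dict of groups plus first-seen order list
def pvGroupsA (clean : List String) : PySem.Dict String (List String) × List String :=
  clean.foldl (fun st cue =>
      let g := pvGroupOf cue
      let st' := if st.1.contains g then st else (st.1.insert g ([] : List String), st.2 ++ [g])
      (st'.1.insert g (st'.1.getD g [] ++ [cue]), st'.2))
    (PySem.Dict.empty, [])

-- A's first selection loop (`.inl r` = early `return selected[:limit]`, `.inr sel` = fell through)
def pvPhase1 (groups : PySem.Dict String (List String)) (per limit : Int) :
    List String → List String → (List String ⊕ List String)
  | [], sel => .inr sel
  | g :: rest, sel =>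
      let sel' := sel ++ PySem.List.slice (groups.getD g []) none (some per)
      if limit ≤ (sel'.length : Int) then .inl (PySem.List.slice sel' none (some limit))
      else pvPhase1 groups per limit rest sel'

-- A's second loop; both its early return and the final fall-through return _dedupe(selected)[:limit]
def pvPhase2 (groups : PySem.Dict String (List String)) (per limit : Int) :
    List String → List String → List String
  | [], sel => PySem.List.slice (pvDedupe sel) none (some limit)
  | g :: rest, sel =>
      let sel' := sel ++ PySem.List.slice (groups.getD g []) (some per) none
      if limit ≤ (sel'.length : Int) then PySem.List.slice (pvDedupe sel') none (some limit)
      else pvPhase2 groups per limit rest sel'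

def balanced_cues_py (cues : List String) (limit : Int) : List String :=
  -- map(str, cues or []) is the identity on a list of str (and on the empty list)
  let clean := pvDedupe cues
  if (clean.length : Int) ≤ limit then clean
  else
    let st := pvGroupsA clean
    let per := max 1 (PySem.Int.floordiv limit (max 1 (st.2.length : Int)))
    match pvPhase1 st.1 per limit st.2 [] with
    | .inl early => early
    | .inr sel =>
        if (sel.length : Int) < limit then pvPhase2 st.1 per limit st.2 sel
        else PySem.List.slice (pvDedupe sel) none (some limit)

-- ===== PORT B =====
-- B's decoration loop body: i, r = gidx.get(g, (len(gidx), 0)); gidx[g] = (i, r+1); keyed.append((i, r, cue))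
def pvStepB (st : PySem.Dict String (Int × Int) × List (Int × Int × String)) (cue : String) :
    PySem.Dict String (Int × Int) × List (Int × Int × String) :=
  let g := pvGroupOf cue
  let p := st.1.getD g ((st.1.size : Int), 0)
  (st.1.insert g (p.1, p.2 + 1), st.2 ++ [(p.1, p.2, cue)])

def balanced_cues_py_alt (cues : List String) (limit : Int) : List String :=
  let clean := pvDedupe cues
  if (clean.length : Int) ≤ limit then clean
  else
    let st := clean.foldl pvStepB (PySem.Dict.empty, [])
    let n := (st.1.size : Int)
    let per := max 1 (PySem.Int.floordiv limit (max 1 n))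
    -- sorted(keyed, key=lambda t: (t[0] if t[1] < per else n + t[0], t[1]))
    let ranked := PySem.List.sorted2 st.2
      (fun t => if t.2.1 < per then t.1 else n + t.1) (fun t => t.2.1)
    (PySem.List.slice ranked none (some limit)).map (fun t => t.2.2)

-- ===== PRECONDITION & SPEC =====
-- Pre_ excludes negative limits: a negative cue budget is outside the function's natural
-- domain, and A's non-empty-input value there (an accidental negative-slice truncation of
-- the first group's head) is an artefact of its implementation.
def Pre_balanced_cues_py (cues : List String) (limit : Int) : Prop := 0 ≤ limit
instance (cues : List String) (limit : Int) : Decidable (Pre_balanced_cues_py cues limit) := by unfold Pre_balanced_cues_py; infer_instance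

def pvWitness_balanced_cues_py : List String × Int := (["a:x", "a:y", "b:z", "c"], 2)

def Spec_balanced_cues_py (cues : List String) (limit : Int) (out : List String) : Prop := out = balanced_cues_py_alt cues limit
instance (cues : List String) (limit : Int) (out : List String) : Decidable (Spec_balanced_cues_py cues limit out) := by unfold Spec_balanced_cues_py; infer_instance

-- ===== CLAIM (what is proved, stated in full; the proofs are below) =====
def Claim_equal_balanced_cues_py : Prop := ∀ (cues : List String) (limit : Int), Dom_balanced_cues_py cues limit → Pre_balanced_cues_py cues limit → Spec_balanced_cues_py cues limit (balanced_cues_py cues limit)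

-- ===== LEMMAS AND PROOFS =====

-- A's grouping dict, in the setdefault-style closed form the proofs use
def pvGB (clean : List String) : PySem.Dict String (List String) :=
  clean.foldl
    (fun d cue => d.insert (pvGroupOf cue) (d.getD (pvGroupOf cue) [] ++ [cue]))
    PySem.Dict.empty

-- closed form of B's decoration: element c gets (index of its group in K, count of its
-- group among the already-processed prefix pg of group names)
def pvDec (K : List String) : List String → List String → List (Int × Int × String)
  | _pg, [] => []
  | pg, c :: rest =>
      ((K.idxOf (pvGroupOf c) : Int), ((pg.count (pvGroupOf c) : Int)), c)
        :: pvDec K (pg ++ [pvGroupOf c]) rest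

-- decorated group block: clean's cues of group g, enumerated, tagged with index i
def pvF (clean : List String) (i : Int) (g : String) : List (Int × Int × String) :=
  (PySem.List.enumerate (clean.filter (fun c => pvGroupOf c == g)) 0).map
    (fun rc => (i, rc.1, rc.2))

-- the invariant that makes _dedupe_preserve_order the identity
def pvGoodP (xs : List String) : Prop :=
  (∀ x ∈ xs, PySem.Str.strip x = x ∧ x ≠ "") ∧ (xs.map PySem.Str.lower).Nodup

theorem pv_take_dropWhile (p : Char → Bool) (l : List Char) (h : l.dropWhile p = l) (k : Nat) :
    (l.take k).dropWhile p = l.take k := by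
  cases l with
  | nil => simp
  | cons a t =>
    cases k with
    | zero => simp
    | succ k =>
      simp only [List.take_succ_cons, List.dropWhile_cons] at *
      split at h
      · exfalso; have hl := List.length_dropWhile_le p t
        have : (List.dropWhile p t).length = t.length + 1 := by rw [h]; simp
        omega
      · next hpa => simp [hpa]

theorem pv_strip_idem (s : String) : PySem.Str.strip (PySem.Str.strip s) = PySem.Str.strip s := by
  apply String.toList_inj.mp
  simp only [PySem.Str.toList_strip]
  generalize s.toList = cs
  simp only [PySem.Chars.strip, PySem.Chars.lstrip, PySem.Chars.rstrip]
  set p := PySem.Chars.isspace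
  set a := cs.dropWhile p with ha
  have h1 : a.dropWhile p = a := List.dropWhile_idempotent p cs
  have h2 : ((a.reverse.dropWhile p).reverse).dropWhile p = (a.reverse.dropWhile p).reverse := by
    have hs : (a.reverse.dropWhile p) <:+ a.reverse := List.dropWhile_suffix p
    have hpre : (a.reverse.dropWhile p).reverse <+: a := by
      have := hs.reverse; simpa using this
    rw [List.prefix_iff_eq_take.mp hpre]
    exact pv_take_dropWhile p a h1 _
  rw [h2, List.reverse_reverse, List.dropWhile_idempotent]

theorem pv_dedupe_aux_good (values : List String) :
    ∀ (seen : PySem.Set String) (out : List String),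
      (∀ x ∈ out, PySem.Str.strip x = x ∧ x ≠ "") →
      ((out.map PySem.Str.lower).Nodup) →
      (∀ x ∈ out, PySem.Str.lower x ∈ seen) →
      pvGoodP ((values.foldl (fun (st : PySem.Set String × List String) value =>
        let clean := PySem.Str.strip value
        if clean = "" then st
        else
          let key := PySem.Str.lower clean
          if PySem.Set.contains st.1 key then st
          else (PySem.Set.add st.1 key, st.2 ++ [clean])) (seen, out)).2) := by
  induction values with
  | nil => intro seen out h1 h2 h3; exact ⟨h1, h2⟩
  | cons v rest ih =>
    intro seen out h1 h2 h3
    simp only [List.foldl_cons]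
    by_cases he : PySem.Str.strip v = ""
    · simpa [he] using ih seen out h1 h2 h3
    · by_cases hc : PySem.Str.lower (PySem.Str.strip v) ∈ seen
      · simpa [he, hc, PySem.Set.contains_iff] using ih seen out h1 h2 h3
      · simp only [he, if_false, PySem.Set.contains_iff, hc, if_neg, if_true]
        have hgoal := ih (PySem.Set.add seen (PySem.Str.lower (PySem.Str.strip v)))
          (out ++ [PySem.Str.strip v]) ?_ ?_ ?_
        · simpa [he, hc, PySem.Set.contains_iff] using hgoal
        · intro x hx
          rcases List.mem_append.mp hx with hx | hx
          · exact h1 x hx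
          · rcases List.mem_singleton.mp hx with rfl
            exact ⟨pv_strip_idem v, he⟩
        · rw [List.map_append]
          apply List.Nodup.append h2 (by simp)
          intro k hk1 hk2
          simp only [List.map_cons, List.map_nil, List.mem_singleton] at hk2
          subst hk2
          rcases List.mem_map.mp hk1 with ⟨x, hx, hlx⟩
          exact hc (hlx ▸ h3 x hx)
        · intro x hx
          rw [PySem.Set.mem_add]
          rcases List.mem_append.mp hx with hx | hx
          · exact Or.inl (h3 x hx)
          · rcases List.mem_singleton.mp hx with rfl
            exact Or.inr rfl

theorem pv_dedupe_good (values : List String) : pvGoodP (pvDedupe values) := by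
  apply pv_dedupe_aux_good values PySem.Set.empty []
  · intro x hx; cases hx
  · simp
  · intro x hx; cases hx

theorem pv_dedupe_aux_id : ∀ (xs : List String) (seen : PySem.Set String) (out : List String),
    (∀ x ∈ xs, PySem.Str.strip x = x ∧ x ≠ "") →
    ((xs.map PySem.Str.lower).Nodup) →
    (∀ x ∈ xs, PySem.Str.lower x ∉ seen) →
    (xs.foldl (fun (st : PySem.Set String × List String) value =>
        let clean := PySem.Str.strip value
        if clean = "" then st
        else
          let key := PySem.Str.lower clean
          if PySem.Set.contains st.1 key then st
          else (PySem.Set.add st.1 key, st.2 ++ [clean])) (seen, out)).2 = out ++ xs := by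
  intro xs
  induction xs with
  | nil => intro seen out _ _ _; simp
  | cons x rest ih =>
    intro seen out h1 h2 h3
    obtain ⟨hs, hne⟩ := h1 x (List.mem_cons_self ..)
    simp only [List.foldl_cons, hs, hne, if_false, PySem.Set.contains_iff,
      h3 x (List.mem_cons_self ..), if_neg, if_true]
    have := ih (PySem.Set.add seen (PySem.Str.lower x)) (out ++ [x]) ?_ ?_ ?_
    · simpa using this
    · exact fun y hy => h1 y (List.mem_cons_of_mem _ hy)
    · exact (List.nodup_cons.mp (by simpa using h2)).2
    · intro y hy
      rw [PySem.Set.mem_add]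
      push_neg
      constructor
      · exact h3 y (List.mem_cons_of_mem _ hy)
      · intro heq
        have hnd := (by simpa using h2 : ((PySem.Str.lower x) :: rest.map PySem.Str.lower).Nodup)
        exact (List.nodup_cons.mp hnd).1 (heq ▸ List.mem_map_of_mem hy)

theorem pv_dedupe_id (xs : List String) (h : pvGoodP xs) : pvDedupe xs = xs := by
  have := pv_dedupe_aux_id xs PySem.Set.empty [] h.1 h.2 (by intro x _; simp [PySem.Set.empty])
  simpa [pvDedupe] using this

theorem pv_good_append_left {xs ys : List String} (h : pvGoodP (xs ++ ys)) : pvGoodP xs := by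
  constructor
  · exact fun x hx => h.1 x (List.mem_append_left ys hx)
  · have := h.2; rw [List.map_append] at this; exact this.sublist (List.sublist_append_left _ _)

theorem pv_good_perm {xs ys : List String} (hp : xs.Perm ys) (h : pvGoodP xs) : pvGoodP ys := by
  constructor
  · exact fun x hx => h.1 x (hp.symm.subset hx)
  · exact ((hp.map PySem.Str.lower).nodup_iff).mp h.2

theorem pv_groupsA_aux (clean : List String) :
    ∀ (d : PySem.Dict String (List String)),
      clean.foldl (fun st cue =>
        let g := pvGroupOf cue
        let st' := if st.1.contains g then st else (st.1.insert g ([] : List String), st.2 ++ [g])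
        (st'.1.insert g (st'.1.getD g [] ++ [cue]), st'.2)) (d, d.keys)
      = (clean.foldl (fun d cue => d.insert (pvGroupOf cue) (d.getD (pvGroupOf cue) [] ++ [cue])) d,
         (clean.foldl (fun d cue => d.insert (pvGroupOf cue) (d.getD (pvGroupOf cue) [] ++ [cue])) d).keys) := by
  induction clean with
  | nil => intro d; rfl
  | cons c rest ih =>
    intro d
    simp only [List.foldl_cons]
    have hstep : (let g := pvGroupOf c
        let st' := if d.contains g then ((d, d.keys) : PySem.Dict String (List String) × List String)
          else (d.insert g ([] : List String), d.keys ++ [g])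
        ((st'.1.insert g (st'.1.getD g [] ++ [c]), st'.2) : PySem.Dict String (List String) × List String))
        = (d.insert (pvGroupOf c) (d.getD (pvGroupOf c) [] ++ [c]),
           (d.insert (pvGroupOf c) (d.getD (pvGroupOf c) [] ++ [c])).keys) := by
      by_cases hc : d.contains (pvGroupOf c) = true
      · simp only [hc, if_true]
        rw [PySem.Dict.keys_insert_of_contains d _ hc]
      · have hc' : d.contains (pvGroupOf c) = false := Bool.eq_false_iff.mpr hc
        simp only [hc', Bool.false_eq_true, if_false]
        rw [PySem.Dict.getD_insert]
        simp only [if_pos rfl, List.nil_append]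
        rw [PySem.Dict.insert_insert_self,
          PySem.Dict.getD_of_not_contains d _ hc',
          PySem.Dict.keys_insert_of_not_contains d _ hc']
        simp
    rw [hstep, ih]

theorem pv_groupsA_eq (clean : List String) :
    pvGroupsA clean = (pvGB clean, (pvGB clean).keys) := by
  have := pv_groupsA_aux clean PySem.Dict.empty
  simpa [pvGroupsA, pvGB] using this

theorem pv_gb_keys_nodup (clean : List String) : (pvGB clean).keys.Nodup := by
  apply PySem.Dict.nodup_keys_foldl_insert_key
  simp [PySem.Dict.empty, PySem.Dict.keys]

-- A's group lists are the per-group filters of clean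
theorem pv_gb_getD_aux (clean : List String) :
    ∀ (d : PySem.Dict String (List String)) (g : String),
      (clean.foldl (fun d cue => d.insert (pvGroupOf cue) (d.getD (pvGroupOf cue) [] ++ [cue])) d).getD g []
        = d.getD g [] ++ clean.filter (fun c => pvGroupOf c == g) := by
  induction clean with
  | nil => intro d g; simp
  | cons c rest ih =>
    intro d g
    simp only [List.foldl_cons, List.filter_cons]
    rw [ih]
    by_cases hc : pvGroupOf c = g
    · subst hc
      rw [PySem.Dict.getD_insert, if_pos rfl]
      simp
    · rw [PySem.Dict.getD_insert, if_neg (fun h => hc h.symm)]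
      have : (pvGroupOf c == g) = false := beq_eq_false_iff_ne.mpr hc
      simp [this]

theorem pv_gb_getD (clean : List String) (g : String) :
    (pvGB clean).getD g [] = clean.filter (fun c => pvGroupOf c == g) := by
  have := pv_gb_getD_aux clean PySem.Dict.empty g
  simpa [pvGB] using this

theorem pv_flatMap_take_drop_perm {α β : Type} (l : List α) (f : α → List β) (n : Nat) :
    (l.flatMap (fun g => (f g).take n) ++ l.flatMap (fun g => (f g).drop n)).Perm (l.flatMap f) := by
  induction l with
  | nil => simp
  | cons a t ih =>
    simp only [List.flatMap_cons, List.append_assoc]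
    refine List.Perm.trans (List.Perm.append_left _ (List.perm_append_comm_assoc _ _ _)) ?_
    rw [← List.append_assoc, List.take_append_drop]
    exact List.Perm.append_left _ ih

theorem pv_flatMap_if_cons_perm {α : Type} (l : List String) (f : String → List α)
    (g0 : String) (x : α) (hm : g0 ∈ l) (hnd : l.Nodup) :
    (l.flatMap (fun g => if g = g0 then x :: f g else f g)).Perm (x :: l.flatMap f) := by
  induction l with
  | nil => cases hm
  | cons a t ih =>
    obtain ⟨hna, hndt⟩ := List.nodup_cons.mp hnd
    simp only [List.flatMap_cons]
    rcases List.mem_cons.mp hm with rfl | hmt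
    · have hcongr : t.flatMap (fun g => if g = g0 then x :: f g else f g) = t.flatMap f := by
        apply List.flatMap_congr <;> try rfl
        intro g hg
        rw [if_neg (by rintro rfl; exact hna hg)]
      rw [hcongr, if_pos rfl]
      rfl
    · have hne : a ≠ g0 := by rintro rfl; exact hna hmt
      rw [if_neg hne]
      refine List.Perm.trans (List.Perm.append_left _ (ih hmt hndt)) ?_
      exact List.perm_middle

-- a list is (up to permutation) the concatenation of its class filters over any Nodup
-- list K of classes covering it
theorem pv_perm_flatMap_filter {α : Type} (cls : α → String) (K : List String)
    (hnd : K.Nodup) :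
    ∀ (L : List α), (∀ x ∈ L, cls x ∈ K) →
      (K.flatMap (fun g => L.filter (fun x => cls x == g))).Perm L := by
  intro L
  induction L with
  | nil => intro _; simp
  | cons x L' ih =>
    intro hall
    have hcongr : K.flatMap (fun g => (x :: L').filter (fun y => cls y == g))
        = K.flatMap (fun g => if g = cls x then x :: L'.filter (fun y => cls y == g)
            else L'.filter (fun y => cls y == g)) := by
      apply List.flatMap_congr <;> try rfl
      intro g _
      by_cases hg : g = cls x
      · subst hg; simp [List.filter_cons]
      · have : (cls x == g) = false := beq_eq_false_iff_ne.mpr (fun h => hg h.symm)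
        simp [List.filter_cons, this, hg]
    rw [hcongr]
    refine List.Perm.trans
      (pv_flatMap_if_cons_perm K (fun g => L'.filter (fun y => cls y == g)) (cls x) x
        (hall x (List.mem_cons_self ..)) hnd) ?_
    exact List.Perm.cons x (ih (fun y hy => hall y (List.mem_cons_of_mem _ hy)))

theorem pv_mem_pvDec (K : List String) :
    ∀ (l pg : List String) (t : Int × Int × String), t ∈ pvDec K pg l → t.2.2 ∈ l := by
  intro l
  induction l with
  | nil => intro pg t h; cases h
  | cons c rest ih =>
    intro pg t h
    rcases List.mem_cons.mp h with rfl | h'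
    · exact List.mem_cons_self ..
    · exact List.mem_cons_of_mem _ (ih _ t h')

-- B's fold computes pvDec and its dict keys collect the groups in first-seen order
theorem pv_stepB_fold (K : List String) :
    ∀ (l : List String) (d : PySem.Dict String (Int × Int)) (acc : List (Int × Int × String))
      (pg : List String),
      d.keys = PySem.Set.ofList pg →
      (∀ g ∈ pg, d.get? g = some ((K.idxOf g : Int), (pg.count g : Int))) →
      PySem.Set.ofList (pg ++ l.map pvGroupOf) <+: K →
      (l.foldl pvStepB (d, acc)).2 = acc ++ pvDec K pg l
      ∧ (l.foldl pvStepB (d, acc)).1.keys = PySem.Set.ofList (pg ++ l.map pvGroupOf) := by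
  intro l
  induction l with
  | nil =>
    intro d acc pg hkeys _ _
    simpa [pvDec] using hkeys
  | cons c rest ih =>
    intro d acc pg hkeys hval hpre
    have hsz : d.size = (PySem.Set.ofList pg).length := by
      rw [← hkeys]; simp [PySem.Dict.size, PySem.Dict.keys]
    set g := pvGroupOf c with hg
    have hcnt1 : ∀ g' : String, g' ≠ g → (pg ++ [g]).count g' = pg.count g' := by
      intro g' he
      simp [List.count_append, List.count_singleton, beq_eq_false_iff_ne.mpr (fun h => he h.symm)]
    by_cases hmem : g ∈ pg
    · -- group already seen
      have hget : d.get? g = some ((K.idxOf g : Int), (pg.count g : Int)) := hval g hmem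
      have hp : d.getD g ((d.size : Int), 0) = ((K.idxOf g : Int), (pg.count g : Int)) :=
        PySem.Dict.getD_of_get?_eq_some d _ hget
      have hstep : pvStepB (d, acc) c
          = (d.insert g ((K.idxOf g : Int), (pg.count g : Int) + 1),
             acc ++ [((K.idxOf g : Int), (pg.count g : Int), c)]) := by
        simp only [pvStepB, ← hg, hp]
      have hcont : d.contains g = true := by
        rw [PySem.Dict.contains_iff_mem_keys, hkeys, PySem.Set.mem_ofList]; exact hmem
      have hih := ih (d.insert g ((K.idxOf g : Int), (pg.count g : Int) + 1))
        (acc ++ [((K.idxOf g : Int), (pg.count g : Int), c)]) (pg ++ [g]) ?_ ?_ ?_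
      · simp only [List.foldl_cons, hstep]
        obtain ⟨h2, h1⟩ := hih
        refine ⟨?_, ?_⟩
        · rw [h2]
          simp only [pvDec, ← hg]
          simp [List.append_assoc]
        · rw [h1]
          simp [← hg, List.append_assoc]
      · rw [PySem.Dict.keys_insert_of_contains _ _ hcont, hkeys,
          PySem.Set.ofList_append_singleton, PySem.Set.add_of_mem]
        rw [PySem.Set.mem_ofList]; exact hmem
      · intro g' hg'
        by_cases he : g' = g
        · subst he
          rw [PySem.Dict.get?_insert_self]
          have hc2 : ((pg ++ [g]).count g : Int) = (pg.count g : Int) + 1 := by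
            rw [List.count_append]
            push_cast
            simp
          rw [hc2]
        · rw [PySem.Dict.get?_insert_of_ne d _ he]
          have hmem' : g' ∈ pg := by
            rcases List.mem_append.mp hg' with h | h
            · exact h
            · exact absurd (List.mem_singleton.mp h) he
          rw [hval g' hmem', hcnt1 g' he]
      · have hApp : (pg ++ [g]) ++ rest.map pvGroupOf = pg ++ (c :: rest).map pvGroupOf := by
          simp [← hg, List.append_assoc]
        rw [hApp]; exact hpre
    · -- new group
      have hnotk : d.contains g = false := by
        rw [Bool.eq_false_iff]
        intro hc
        rw [PySem.Dict.contains_iff_mem_keys, hkeys, PySem.Set.mem_ofList] at hc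
        exact hmem hc
      have hnone : d.get? g = none := by
        rw [PySem.Dict.get?_eq_none_iff_contains]
        exact hnotk
      have hgno : g ∉ PySem.Set.ofList pg := by
        rw [PySem.Set.mem_ofList]; exact hmem
      -- position of the fresh group: it sits right after ofList pg inside K
      have hprefix1 : PySem.Set.ofList pg ++ [g] <+: K := by
        have e1 : PySem.Set.ofList (pg ++ (c :: rest).map pvGroupOf)
            = PySem.Set.update (PySem.Set.add (PySem.Set.ofList pg) g) (rest.map pvGroupOf) := by
          rw [PySem.Set.ofList_append]
          simp [← hg, PySem.Set.update_cons]
        have e2 : PySem.Set.add (PySem.Set.ofList pg) g = PySem.Set.ofList pg ++ [g] :=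
          PySem.Set.add_of_not_mem hgno
        have e3 : (PySem.Set.ofList pg ++ [g]) <+:
            PySem.Set.update (PySem.Set.ofList pg ++ [g]) (rest.map pvGroupOf) := by
          rw [PySem.Set.update_eq_append_filter]
          exact ⟨_, rfl⟩
        refine List.IsPrefix.trans ?_ hpre
        rw [e1, e2]
        exact e3
      have hidx : K.idxOf g = (PySem.Set.ofList pg).length := by
        obtain ⟨t, ht⟩ := hprefix1
        rw [← ht, List.append_assoc, List.idxOf_append, if_neg hgno,
          List.singleton_append, List.idxOf_cons_self]
        simp
      have hcnt : pg.count g = 0 := List.count_eq_zero.mpr hmem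
      have hstep : pvStepB (d, acc) c
          = (d.insert g ((K.idxOf g : Int), (0 : Int) + 1),
             acc ++ [((K.idxOf g : Int), (0 : Int), c)]) := by
        simp only [pvStepB, ← hg]
        rw [PySem.Dict.getD_of_get?_eq_none d _ hnone, hsz, hidx]
      have hih := ih (d.insert g ((K.idxOf g : Int), (0 : Int) + 1))
        (acc ++ [((K.idxOf g : Int), (0 : Int), c)]) (pg ++ [g]) ?_ ?_ ?_
      · simp only [List.foldl_cons, hstep]
        obtain ⟨h2, h1⟩ := hih
        refine ⟨?_, ?_⟩
        · rw [h2]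
          simp only [pvDec, ← hg, hcnt]
          simp [List.append_assoc]
        · rw [h1]
          simp [← hg, List.append_assoc]
      · rw [PySem.Dict.keys_insert_of_not_contains _ _ hnotk, hkeys,
          PySem.Set.ofList_append_singleton, PySem.Set.add_of_not_mem hgno]
      · intro g' hg'
        by_cases he : g' = g
        · subst he
          rw [PySem.Dict.get?_insert_self]
          have hc2 : ((pg ++ [g]).count g : Int) = 1 := by
            rw [List.count_append, hcnt]
            push_cast
            simp
          rw [hc2]
          norm_num
        · rw [PySem.Dict.get?_insert_of_ne d _ he]
          have hmem' : g' ∈ pg := by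
            rcases List.mem_append.mp hg' with h | h
            · exact h
            · exact absurd (List.mem_singleton.mp h) he
          rw [hval g' hmem', hcnt1 g' he]
      · have hApp : (pg ++ [g]) ++ rest.map pvGroupOf = pg ++ (c :: rest).map pvGroupOf := by
          simp [← hg, List.append_assoc]
        rw [hApp]; exact hpre

-- the per-group filter of B's decorated list is the enumerated group block
theorem pv_pvDec_filter (K : List String) :
    ∀ (l pg : List String) (g : String),
      (pvDec K pg l).filter (fun t => pvGroupOf t.2.2 == g)
        = (PySem.List.enumerate (l.filter (fun c => pvGroupOf c == g)) (pg.count g)).map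
            (fun rc => ((K.idxOf g : Int), rc.1, rc.2)) := by
  intro l
  induction l with
  | nil => intro pg g; simp [pvDec, PySem.List.enumerate]
  | cons c rest ih =>
    intro pg g
    simp only [pvDec, List.filter_cons]
    by_cases hc : pvGroupOf c = g
    · subst hc
      simp only [beq_self_eq_true, if_pos]
      rw [PySem.List.enumerate_cons, List.map_cons]
      have hcnt : ((pg ++ [pvGroupOf c]).count (pvGroupOf c) : Int) = (pg.count (pvGroupOf c) : Int) + 1 := by
        simp [List.count_append]
      rw [ih (pg ++ [pvGroupOf c]) (pvGroupOf c), hcnt]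
    · have hb : (pvGroupOf c == g) = false := beq_eq_false_iff_ne.mpr hc
      simp only [hb, Bool.false_eq_true, if_false]
      rw [ih (pg ++ [pvGroupOf c]) g]
      have : (pg ++ [pvGroupOf c]).count g = pg.count g := by
        simp [List.count_append, List.count_singleton, beq_eq_false_iff_ne.mpr hc]
      rw [this]

theorem pv_mem_enum_take {α : Type} {xs : List α} {m : Nat} {rc : Int × α}
    (h : rc ∈ (PySem.List.enumerate xs 0).take m) : 0 ≤ rc.1 ∧ rc.1 < (m : Int) := by
  obtain ⟨k, hk, heq⟩ := List.mem_iff_getElem.mp h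
  have hk0 := hk
  rw [List.length_take] at hk0
  have hkm : k < m := lt_of_lt_of_le hk0 (min_le_left _ _)
  rw [List.getElem_take, PySem.List.getElem_enumerate] at heq
  subst heq
  constructor <;> simp <;> omega

theorem pv_mem_enum_drop {α : Type} {xs : List α} {m : Nat} {rc : Int × α}
    (h : rc ∈ (PySem.List.enumerate xs 0).drop m) : (m : Int) ≤ rc.1 := by
  obtain ⟨k, hk, heq⟩ := List.mem_iff_getElem.mp h
  rw [List.getElem_drop, PySem.List.getElem_enumerate] at heq
  subst heq
  simp

theorem pv_mem_F_take {clean : List String} {i : Int} {g : String} {m : Nat}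
    {t : Int × Int × String} (h : t ∈ (pvF clean i g).take m) :
    t.1 = i ∧ 0 ≤ t.2.1 ∧ t.2.1 < (m : Int) := by
  rw [pvF, ← List.map_take] at h
  obtain ⟨rc, hrc, heq⟩ := List.mem_map.mp h
  obtain ⟨h1, h2⟩ := pv_mem_enum_take hrc
  subst heq
  exact ⟨rfl, h1, h2⟩

theorem pv_mem_F_drop {clean : List String} {i : Int} {g : String} {m : Nat}
    {t : Int × Int × String} (h : t ∈ (pvF clean i g).drop m) :
    t.1 = i ∧ (m : Int) ≤ t.2.1 := by
  rw [pvF, ← List.map_drop] at h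
  obtain ⟨rc, hrc, heq⟩ := List.mem_map.mp h
  have h1 := pv_mem_enum_drop hrc
  subst heq
  exact ⟨rfl, h1⟩

theorem pv_pairwise_F {clean : List String} {i : Int} {g : String} :
    (pvF clean i g).Pairwise (fun a b => a.2.1 < b.2.1) := by
  rw [pvF]
  rw [List.pairwise_map]
  exact PySem.List.pairwise_lt_enumerate _ 0

theorem pv_mem_enum_bounds {α : Type} {xs : List α} {p : Int × α}
    (h : p ∈ PySem.List.enumerate xs 0) : 0 ≤ p.1 ∧ p.1 < (xs.length : Int) := by
  obtain ⟨k, hk, heq⟩ := (PySem.List.mem_enumerate_iff xs 0 p).mp h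
  subst heq
  constructor <;> simp <;> omega

theorem pv_sorted2_lex {α : Type} (xs : List α) (k1 k2 : α → Int) :
    PySem.List.sorted2 xs k1 k2 = PySem.List.sorted xs (fun x => toLex (k1 x, k2 x)) := by
  rw [PySem.List.sorted_eq_foldl_insertBy]
  unfold PySem.List.sorted2
  simp only [if_neg (by decide : ¬ (false = true))]
  congr 1
  funext acc x
  congr 1
  funext a b
  by_cases h1 : k1 a < k1 b <;> by_cases h2 : k1 b < k1 a <;> by_cases h3 : k2 a < k2 b <;>
    simp [h1, h2, h3, Prod.Lex.toLex_lt_toLex] <;> omega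

theorem pv_phase1_spec (G : PySem.Dict String (List String)) (per limit : Int)
    (hlim : 0 ≤ limit) :
    ∀ (l sel : List String), (l = [] → (sel.length : Int) < limit) →
      pvPhase1 G per limit l sel =
        (if limit ≤ (((sel ++ l.flatMap (fun g => PySem.List.slice (G.getD g []) none (some per))).length : Int))
         then .inl ((sel ++ l.flatMap (fun g => PySem.List.slice (G.getD g []) none (some per))).take limit.toNat)
         else .inr (sel ++ l.flatMap (fun g => PySem.List.slice (G.getD g []) none (some per)))) := by
  intro l
  induction l with
  | nil =>
    intro sel h
    have hsel := h rfl
    rw [List.flatMap_nil, List.append_nil, if_neg (by omega)]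
    rfl
  | cons g rest ih =>
    intro sel _
    rw [List.flatMap_cons, ← List.append_assoc]
    set sel' := sel ++ PySem.List.slice (G.getD g []) none (some per) with hsel'
    by_cases hc : limit ≤ (sel'.length : Int)
    · have hlen : sel'.length ≤ (sel' ++ rest.flatMap (fun g => PySem.List.slice (G.getD g []) none (some per))).length := by
        simp
      have hlen2 : limit.toNat ≤ sel'.length := by omega
      have htake : List.take limit.toNat (sel' ++ rest.flatMap (fun g => PySem.List.slice (G.getD g []) none (some per)))
          = List.take limit.toNat sel' := List.take_append_of_le_length hlen2
      rw [if_pos (le_trans hc (by exact_mod_cast hlen)), htake]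
      show (if limit ≤ (sel'.length : Int) then Sum.inl (PySem.List.slice sel' none (some limit))
            else pvPhase1 G per limit rest sel') = _
      rw [if_pos hc, PySem.List.slice_to _ hlim]
    · show (if limit ≤ (sel'.length : Int) then Sum.inl (PySem.List.slice sel' none (some limit))
            else pvPhase1 G per limit rest sel') = _
      rw [if_neg hc]
      exact ih sel' (fun _ => by omega)

theorem pv_phase2_spec (G : PySem.Dict String (List String)) (per limit : Int)
    (hlim : 0 ≤ limit) :
    ∀ (l sel : List String),
      pvGoodP (sel ++ l.flatMap (fun g => PySem.List.slice (G.getD g []) (some per) none)) →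
      pvPhase2 G per limit l sel =
        (sel ++ l.flatMap (fun g => PySem.List.slice (G.getD g []) (some per) none)).take limit.toNat := by
  intro l
  induction l with
  | nil =>
    intro sel h
    rw [List.flatMap_nil, List.append_nil] at h ⊢
    show PySem.List.slice (pvDedupe sel) none (some limit) = _
    rw [pv_dedupe_id sel h, PySem.List.slice_to _ hlim]
  | cons g rest ih =>
    intro sel hGood
    rw [List.flatMap_cons, ← List.append_assoc] at hGood ⊢
    set sel' := sel ++ PySem.List.slice (G.getD g []) (some per) none with hsel'
    by_cases hc : limit ≤ (sel'.length : Int)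
    · show (if limit ≤ (sel'.length : Int) then PySem.List.slice (pvDedupe sel') none (some limit)
            else pvPhase2 G per limit rest sel') = _
      have hlen2 : limit.toNat ≤ sel'.length := by omega
      have htake : List.take limit.toNat (sel' ++ rest.flatMap (fun g => PySem.List.slice (G.getD g []) (some per) none))
          = List.take limit.toNat sel' := List.take_append_of_le_length hlen2
      rw [if_pos hc, pv_dedupe_id sel' (pv_good_append_left hGood), PySem.List.slice_to _ hlim, htake]
    · show (if limit ≤ (sel'.length : Int) then PySem.List.slice (pvDedupe sel') none (some limit)
            else pvPhase2 G per limit rest sel') = _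
      rw [if_neg hc]
      exact ih sel' hGood

theorem pv_flatMap_enum_snd {α β : Type} (K : List α) (h : α → List β) :
    (PySem.List.enumerate K 0).flatMap (fun p => h p.2) = K.flatMap h := by
  conv_rhs => rw [← PySem.List.map_snd_enumerate K 0]
  rw [List.flatMap_map]

theorem pv_map_F_take (clean : List String) (i : Int) (g : String) (m : Nat) :
    ((pvF clean i g).take m).map (fun t => t.2.2)
      = (clean.filter (fun c => pvGroupOf c == g)).take m := by
  rw [pvF, ← List.map_take, List.map_map]
  have hcomp : ((fun (t : Int × Int × String) => t.2.2) ∘ (fun rc : Int × String => (i, rc.1, rc.2)))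
      = (fun x : Int × String => x.2) := rfl
  rw [hcomp, List.map_take, PySem.List.map_snd_enumerate]

theorem pv_map_F_drop (clean : List String) (i : Int) (g : String) (m : Nat) :
    ((pvF clean i g).drop m).map (fun t => t.2.2)
      = (clean.filter (fun c => pvGroupOf c == g)).drop m := by
  rw [pvF, ← List.map_drop, List.map_map]
  have hcomp : ((fun (t : Int × Int × String) => t.2.2) ∘ (fun rc : Int × String => (i, rc.1, rc.2)))
      = (fun x : Int × String => x.2) := rfl
  rw [hcomp, List.map_drop, PySem.List.map_snd_enumerate]

-- ===== VERDICT (by name: the statement is the Claim_ definition above) =====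
set_option maxHeartbeats 2000000 in
theorem balanced_cues_py_spec : Claim_equal_balanced_cues_py := by
  intro cues limit _ hpre
  have hlim : 0 ≤ limit := hpre
  show balanced_cues_py cues limit = balanced_cues_py_alt cues limit
  simp only [balanced_cues_py, balanced_cues_py_alt]
  by_cases h1 : ((pvDedupe cues).length : Int) ≤ limit
  · rw [if_pos h1, if_pos h1]
  · rw [if_neg h1, if_neg h1]
    set clean := pvDedupe cues with hclean
    rw [pv_groupsA_eq clean]
    set G := pvGB clean with hG
    set K := G.keys with hK
    have hKnd : K.Nodup := pv_gb_keys_nodup clean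
    have hKset : K = PySem.Set.ofList (clean.map pvGroupOf) := by
      rw [hK, hG, pvGB, PySem.Dict.keys_foldl_insert_key]
      have hke : (PySem.Dict.empty : PySem.Dict String (List String)).keys = [] := rfl
      rw [hke, PySem.Set.update_nil_left]
    -- B's decoration fold
    have hfold := pv_stepB_fold K clean PySem.Dict.empty [] [] (by rfl)
      (by intro g hg; cases hg)
      (by rw [List.nil_append, ← hKset])
    obtain ⟨hkeyed, hkeysF⟩ := hfold
    rw [List.nil_append] at hkeyed
    have hkeysK : (clean.foldl pvStepB ((PySem.Dict.empty : PySem.Dict String (Int × Int)), [])).1.keys = K := by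
      rw [hkeysF, List.nil_append, ← hKset]
    have hszK : (((clean.foldl pvStepB ((PySem.Dict.empty : PySem.Dict String (Int × Int)), [])).1.size : Nat) : Int) = (K.length : Int) := by
      have hsk : (clean.foldl pvStepB ((PySem.Dict.empty : PySem.Dict String (Int × Int)), [])).1.size
          = (clean.foldl pvStepB ((PySem.Dict.empty : PySem.Dict String (Int × Int)), [])).1.keys.length := by
        simp [PySem.Dict.size, PySem.Dict.keys]
      rw [hsk, hkeysK]
    rw [hkeyed, hszK]
    clear_value clean G K
    set per := max 1 (PySem.Int.floordiv limit (max 1 (K.length : Int))) with hperdef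
    have hper1 : (1 : Int) ≤ per := le_max_left _ _
    have hperNat : ((per.toNat : Nat) : Int) = per := Int.toNat_of_nonneg (by omega)
    set m := per.toNat with hmdef
    -- A-side selection lists
    set Hd := K.flatMap (fun g => PySem.List.slice (G.getD g []) none (some per)) with hHd
    set Tl := K.flatMap (fun g => PySem.List.slice (G.getD g []) (some per) none) with hTl
    have hHd' : Hd = K.flatMap (fun g => (clean.filter (fun c => pvGroupOf c == g)).take m) := by
      rw [hHd]
      apply List.flatMap_congr
      intro g _
      rw [PySem.List.slice_to _ (by omega), hG, pv_gb_getD, hmdef]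
    have hTl' : Tl = K.flatMap (fun g => (clean.filter (fun c => pvGroupOf c == g)).drop m) := by
      rw [hTl]
      apply List.flatMap_congr
      intro g _
      rw [PySem.List.slice_from _ (by omega), hG, pv_gb_getD, hmdef]
    have hperm_clean : (Hd ++ Tl).Perm clean := by
      rw [hHd', hTl']
      have hq' := pv_flatMap_take_drop_perm K (fun g => clean.filter (fun c => pvGroupOf c == g)) m
      refine hq'.trans ?_
      have hq2 := pv_perm_flatMap_filter pvGroupOf K hKnd clean
        (fun c hc => by rw [hKset, PySem.Set.mem_ofList]; exact List.mem_map_of_mem hc)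
      exact hq2
    have hGood : pvGoodP (Hd ++ Tl) :=
      pv_good_perm hperm_clean.symm (hclean ▸ pv_dedupe_good cues)
    have hclne : clean ≠ [] := by
      intro hE; rw [hE] at h1; simp at h1; omega
    have hKne : K ≠ [] := by
      obtain ⟨c, rest, hcr⟩ := List.exists_cons_of_ne_nil hclne
      have hmK : pvGroupOf c ∈ K := by
        rw [hKset, PySem.Set.mem_ofList]
        exact List.mem_map_of_mem (by rw [hcr]; exact List.mem_cons_self ..)
      exact List.ne_nil_of_mem hmK
    -- B's sorted order is the concatenation of decorated head blocks then tail blocks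
    set HdD := (PySem.List.enumerate K 0).flatMap (fun p => (pvF clean p.1 p.2).take m) with hHdD
    set TlD := (PySem.List.enumerate K 0).flatMap (fun p => (pvF clean p.1 p.2).drop m) with hTlD
    have hmemDec : ∀ t ∈ pvDec K [] clean, pvGroupOf t.2.2 ∈ K := by
      intro t ht
      rw [hKset, PySem.Set.mem_ofList]
      exact List.mem_map_of_mem (pv_mem_pvDec K clean [] t ht)
    have estep : ∀ p ∈ PySem.List.enumerate K 0,
        pvF clean p.1 p.2 = (pvDec K [] clean).filter (fun t => pvGroupOf t.2.2 == p.2) := by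
      intro p hp
      obtain ⟨k, hkl, heq⟩ := (PySem.List.mem_enumerate_iff K 0 p).mp hp
      subst heq
      rw [pv_pvDec_filter K clean [] _, pvF]
      simp [List.Nodup.idxOf_getElem hKnd]
    have e2 : (PySem.List.enumerate K 0).flatMap (fun p => pvF clean p.1 p.2)
        = K.flatMap (fun g => (pvDec K [] clean).filter (fun t => pvGroupOf t.2.2 == g)) := by
      rw [List.flatMap_congr estep]
      have e2' := pv_flatMap_enum_snd K
        (fun g => (pvDec K [] clean).filter (fun t => pvGroupOf t.2.2 == g))
      exact e2'
    have hperm2 : (HdD ++ TlD).Perm (pvDec K [] clean) := by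
      rw [hHdD, hTlD]
      have hp' := pv_flatMap_take_drop_perm (PySem.List.enumerate K 0) (fun p => pvF clean p.1 p.2) m
      refine hp'.trans ?_
      rw [e2]
      have hp2 := pv_perm_flatMap_filter (fun t => pvGroupOf t.2.2) K hKnd (pvDec K [] clean) hmemDec
      exact hp2
    -- strict key ordering along HdD ++ TlD
    have hHdFact : ∀ x ∈ HdD, 0 ≤ x.1 ∧ x.1 < (K.length : Int) ∧ 0 ≤ x.2.1 ∧ x.2.1 < per := by
      intro x hx
      rw [hHdD] at hx
      obtain ⟨p, hp, hxp⟩ := List.mem_flatMap.mp hx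
      obtain ⟨hb1, hb2⟩ := pv_mem_enum_bounds hp
      obtain ⟨hx1, hx2, hx3⟩ := pv_mem_F_take hxp
      rw [hx1]
      rw [hmdef, hperNat] at hx3
      exact ⟨hb1, hb2, hx2, hx3⟩
    have hTlFact : ∀ y ∈ TlD, 0 ≤ y.1 ∧ y.1 < (K.length : Int) ∧ per ≤ y.2.1 := by
      intro y hy
      rw [hTlD] at hy
      obtain ⟨p, hp, hyp⟩ := List.mem_flatMap.mp hy
      obtain ⟨hb1, hb2⟩ := pv_mem_enum_bounds hp
      obtain ⟨hy1, hy2⟩ := pv_mem_F_drop hyp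
      rw [hy1]
      rw [hmdef, hperNat] at hy2
      exact ⟨hb1, hb2, hy2⟩
    have hpwHd : HdD.Pairwise (fun a b =>
        toLex ((if a.2.1 < per then a.1 else (K.length : Int) + a.1), a.2.1)
          < toLex ((if b.2.1 < per then b.1 else (K.length : Int) + b.1), b.2.1)) := by
      rw [hHdD, List.pairwise_flatMap]
      constructor
      · intro p _
        refine List.Pairwise.imp_of_mem ?_
          ((pv_pairwise_F (clean := clean) (i := p.1) (g := p.2)).sublist (List.take_sublist m _))
        intro a b ha hb hr
        obtain ⟨ha1, _, ha3⟩ := pv_mem_F_take ha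
        obtain ⟨hb1, _, hb3⟩ := pv_mem_F_take hb
        rw [hmdef, hperNat] at ha3 hb3
        rw [Prod.Lex.toLex_lt_toLex]
        right
        rw [if_pos ha3, if_pos hb3, ha1, hb1]
        exact ⟨rfl, hr⟩
      · refine List.Pairwise.imp ?_ (PySem.List.pairwise_lt_enumerate K 0)
        intro p q hpq x hx y hy
        obtain ⟨hx1, _, hx3⟩ := pv_mem_F_take hx
        obtain ⟨hy1, _, hy3⟩ := pv_mem_F_take hy
        rw [hmdef, hperNat] at hx3 hy3
        rw [Prod.Lex.toLex_lt_toLex]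
        left
        rw [if_pos hx3, if_pos hy3, hx1, hy1]
        exact hpq
    have hpwTl : TlD.Pairwise (fun a b =>
        toLex ((if a.2.1 < per then a.1 else (K.length : Int) + a.1), a.2.1)
          < toLex ((if b.2.1 < per then b.1 else (K.length : Int) + b.1), b.2.1)) := by
      rw [hTlD, List.pairwise_flatMap]
      constructor
      · intro p _
        refine List.Pairwise.imp_of_mem ?_
          ((pv_pairwise_F (clean := clean) (i := p.1) (g := p.2)).sublist (List.drop_sublist m _))
        intro a b ha hb hr
        obtain ⟨ha1, ha2⟩ := pv_mem_F_drop ha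
        obtain ⟨hb1, hb2⟩ := pv_mem_F_drop hb
        rw [hmdef, hperNat] at ha2 hb2
        rw [Prod.Lex.toLex_lt_toLex]
        right
        rw [if_neg (by omega), if_neg (by omega), ha1, hb1]
        exact ⟨rfl, hr⟩
      · refine List.Pairwise.imp ?_ (PySem.List.pairwise_lt_enumerate K 0)
        intro p q hpq x hx y hy
        obtain ⟨hx1, hx2⟩ := pv_mem_F_drop hx
        obtain ⟨hy1, hy2⟩ := pv_mem_F_drop hy
        rw [hmdef, hperNat] at hx2 hy2
        rw [Prod.Lex.toLex_lt_toLex]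
        left
        rw [if_neg (by omega), if_neg (by omega), hx1, hy1]
        omega
    have hpw : (HdD ++ TlD).Pairwise (fun a b =>
        toLex ((if a.2.1 < per then a.1 else (K.length : Int) + a.1), a.2.1)
          < toLex ((if b.2.1 < per then b.1 else (K.length : Int) + b.1), b.2.1)) := by
      rw [List.pairwise_append]
      refine ⟨hpwHd, hpwTl, ?_⟩
      intro x hx y hy
      obtain ⟨hxa, hxb, _, hxd⟩ := hHdFact x hx
      obtain ⟨hya, _, hyc⟩ := hTlFact y hy
      rw [Prod.Lex.toLex_lt_toLex]
      left
      rw [if_pos hxd, if_neg (by omega)]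
      omega
    have hsorted : PySem.List.sorted2 (pvDec K [] clean)
        (fun t => if t.2.1 < per then t.1 else (K.length : Int) + t.1) (fun t => t.2.1)
        = HdD ++ TlD := by
      rw [pv_sorted2_lex]
      exact PySem.List.sorted_eq_of_perm_of_pairwise_lt _ _ _ hperm2 hpw
    -- projecting the decorated order gives A's selection lists
    have hmapHd : HdD.map (fun t => t.2.2) = Hd := by
      rw [hHdD, List.map_flatMap, hHd',
        List.flatMap_congr (fun p _ => pv_map_F_take clean p.1 p.2 m)]
      have hmt := pv_flatMap_enum_snd K
        (fun g => (clean.filter (fun c => pvGroupOf c == g)).take m)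
      exact hmt
    have hmapTl : TlD.map (fun t => t.2.2) = Tl := by
      rw [hTlD, List.map_flatMap, hTl',
        List.flatMap_congr (fun p _ => pv_map_F_drop clean p.1 p.2 m)]
      have hmd := pv_flatMap_enum_snd K
        (fun g => (clean.filter (fun c => pvGroupOf c == g)).drop m)
      exact hmd
    have hBside : (PySem.List.slice (PySem.List.sorted2 (pvDec K [] clean)
          (fun t => if t.2.1 < per then t.1 else (K.length : Int) + t.1) (fun t => t.2.1))
          none (some limit)).map (fun t => t.2.2)
        = (Hd ++ Tl).take limit.toNat := by
      rw [hsorted, PySem.List.slice_to _ hlim, List.map_take, List.map_append, hmapHd, hmapTl]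
    -- A's two phases compute the same truncation
    have hp1 := pv_phase1_spec G per limit hlim K [] (fun hE => absurd hE hKne)
    simp only [List.nil_append, ← hHd] at hp1
    by_cases h2 : limit ≤ (Hd.length : Int)
    · rw [if_pos h2] at hp1
      rw [hp1]
      show Hd.take limit.toNat = _
      rw [hBside, List.take_append_of_le_length (by omega)]
    · rw [if_neg h2] at hp1
      rw [hp1]
      show (if ((Hd.length : Int) < limit) then pvPhase2 G per limit K Hd
            else PySem.List.slice (pvDedupe Hd) none (some limit)) = _
      rw [if_pos (by omega : (Hd.length : Int) < limit)]
      rw [pv_phase2_spec G per limit hlim K Hd (by rw [← hTl]; exact hGood)]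
      rw [hBside, ← hTl]
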